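-- pv_equiv track=rewrite | github.com/dxe4/python-ggplot | src/python_ggplot/public_interface/utils.py | fill_empty_spaces
-- ===== SOURCE A (Python) =====
-- from typing import (
--     Any,
--     Dict,
--     List,
--     Literal,
--     Optional,
--     Set,
--     Tuple,
--     Type,
--     Union,
--     no_type_check,
-- )
--
-- def fill_empty_spaces(
--     rows: int,
--     cols: int,
--     items: List[Optional[Any]],
--     horizontal_orientation: str,
--     vertical_orientation: str,
-- ) -> List[Optional[Any]]:
--     total_cells = rows * cols
--     items = items[:total_cells] + [None] * (total_cells - len(items))
--
--     if "top_to_bottom" == vertical_orientation: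
--         row_order = list(range(rows))
--     else:
--         row_order = list(reversed(range(rows)))
--
--     if "left_to_right" == horizontal_orientation:
--         col_order = list(range(cols))
--     else:
--         col_order = list(reversed(range(cols)))
--
--     positions = [(r, c) for r in row_order for c in col_order]
--
--     grid = [None] * total_cells
--
--     for item, (r, c) in zip(items, positions):
--         grid[r * cols + c] = item
--
--     return grid
-- ===== SOURCE B (Python) =====
-- def fill_empty_spaces(
--     rows,
--     cols,
--     items,
--     horizontal_orientation,
--     vertical_orientation,
-- ):
--     total_cells = rows * cols
--     padded = items[:total_cells] + [None] * (total_cells - len(items))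
--     chunks = [padded[i * cols : (i + 1) * cols] for i in range(rows)]
--     if vertical_orientation != "top_to_bottom":
--         chunks.reverse()
--     if horizontal_orientation != "left_to_right":
--         chunks = [list(reversed(row)) for row in chunks]
--     return [x for row in chunks for x in row]
-- ===== Notes on version B (the rewrite author's own statement) =====
-- stated objective: alternative
-- what changed: A builds orientation-ordered row/col index lists, takes their Cartesian product and scatters items one by one into a preallocated flat grid at computed linear indices; B never computes a single cell index: it chunks the padded list into rows by slicing, reverses the row list and/or each row per the orientations, and flattens.
-- outside the precondition, e.g. on fill_empty_spaces(1, -1, [1, 2, 3], 'x', 'y'): A returns [], B returns [1]; on fill_empty_spaces(-2, -3, [1], 'x', 'y'): A returns [None, None, None, None, None, None], B returns []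
import Mathlib
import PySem

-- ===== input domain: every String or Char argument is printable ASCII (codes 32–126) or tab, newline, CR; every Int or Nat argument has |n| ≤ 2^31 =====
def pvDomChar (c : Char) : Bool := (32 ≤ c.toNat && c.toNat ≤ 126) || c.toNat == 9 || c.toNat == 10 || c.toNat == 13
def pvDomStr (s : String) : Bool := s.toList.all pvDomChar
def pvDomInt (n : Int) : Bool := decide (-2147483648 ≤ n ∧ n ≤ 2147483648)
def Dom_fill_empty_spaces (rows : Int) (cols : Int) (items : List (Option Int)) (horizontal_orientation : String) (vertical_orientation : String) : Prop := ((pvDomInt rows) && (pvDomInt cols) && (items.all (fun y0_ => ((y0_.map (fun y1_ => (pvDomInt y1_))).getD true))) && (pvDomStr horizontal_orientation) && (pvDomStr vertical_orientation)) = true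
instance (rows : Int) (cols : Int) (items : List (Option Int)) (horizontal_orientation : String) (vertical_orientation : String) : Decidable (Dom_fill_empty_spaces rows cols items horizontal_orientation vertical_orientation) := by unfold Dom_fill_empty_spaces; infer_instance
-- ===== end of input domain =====

-- B replaces A's index-arithmetic scatter (orientation-ordered row/col lists, Cartesian
-- product of positions, per-item writes into a preallocated flat grid at computed linear
-- indices) by whole-structure operations: chunk the padded list into rows by slicing,
-- reverse the row list and/or each row per the orientations, and flatten.

-- ===== PORT A =====
-- 'grid[r*cols+c] = item' is ported with pySetD (the total form of Python's list assignment);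
-- under Pre_ the index is always in range, exactly where the Python assignment succeeds.
def fill_empty_spaces (rows : Int) (cols : Int) (items : List (Option Int)) (horizontal_orientation : String) (vertical_orientation : String) : List (Option Int) :=
  let total_cells : Int := rows * cols
  let items2 : List (Option Int) :=
    PySem.List.slice items none (some total_cells) ++
      PySem.List.pyRepeat [(none : Option Int)] (total_cells - (items.length : Int))
  let row_order : List Int :=
    if ("top_to_bottom" == vertical_orientation) then PySem.List.pyRange 0 rows 1
    else (PySem.List.pyRange 0 rows 1).reverse
  let col_order : List Int :=
    if ("left_to_right" == horizontal_orientation) then PySem.List.pyRange 0 cols 1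
    else (PySem.List.pyRange 0 cols 1).reverse
  let positions : List (Int × Int) := row_order.flatMap (fun r => col_order.map (fun c => (r, c)))
  let grid : List (Option Int) := PySem.List.pyRepeat [(none : Option Int)] total_cells
  (List.zip items2 positions).foldl
    (fun g x => PySem.List.pySetD g (x.2.1 * cols + x.2.2) x.1) grid

-- ===== PORT B =====
def fill_empty_spaces_alt (rows : Int) (cols : Int) (items : List (Option Int)) (horizontal_orientation : String) (vertical_orientation : String) : List (Option Int) :=
  let total_cells : Int := rows * cols
  let padded : List (Option Int) :=
    PySem.List.slice items none (some total_cells) ++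
      PySem.List.pyRepeat [(none : Option Int)] (total_cells - (items.length : Int))
  let chunks : List (List (Option Int)) :=
    (PySem.List.pyRange 0 rows 1).map
      (fun i => PySem.List.slice padded (some (i * cols)) (some ((i + 1) * cols)))
  let chunks : List (List (Option Int)) :=
    if vertical_orientation != "top_to_bottom" then chunks.reverse else chunks
  let chunks : List (List (Option Int)) :=
    if horizontal_orientation != "left_to_right" then chunks.map (fun row => row.reverse)
    else chunks
  chunks.flatMap (fun row => row)

-- ===== PRECONDITION & SPEC =====
-- Pre_ restricts to the natural domain of a grid fill: a nonnegative column count.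
-- (A nonnegative row count need not be required: for rows < 0 both programs return [].)
-- For cols < 0 A still returns (its negative linear indices and negative slice bounds
-- produce [] or a list of Nones although no cell exists), a degenerate input outside the
-- natural domain which B's row-chunking does not mimic, so it is excluded.
def Pre_fill_empty_spaces (rows : Int) (cols : Int) (items : List (Option Int)) (horizontal_orientation : String) (vertical_orientation : String) : Prop :=
  0 ≤ cols
instance (rows : Int) (cols : Int) (items : List (Option Int)) (horizontal_orientation : String) (vertical_orientation : String) : Decidable (Pre_fill_empty_spaces rows cols items horizontal_orientation vertical_orientation) := by unfold Pre_fill_empty_spaces; infer_instance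

def pvWitness_fill_empty_spaces : Int × Int × List (Option Int) × String × String :=
  (2, 3, [some 1, none, some 4, some 9], "left_to_right", "bottom_to_top")

def Spec_fill_empty_spaces (rows : Int) (cols : Int) (items : List (Option Int)) (horizontal_orientation : String) (vertical_orientation : String) (out : List (Option Int)) : Prop := out = fill_empty_spaces_alt rows cols items horizontal_orientation vertical_orientation
instance (rows : Int) (cols : Int) (items : List (Option Int)) (horizontal_orientation : String) (vertical_orientation : String) (out : List (Option Int)) : Decidable (Spec_fill_empty_spaces rows cols items horizontal_orientation vertical_orientation out) := by unfold Spec_fill_empty_spaces; infer_instance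

-- ===== CLAIM (what is proved, stated in full; the proofs are below) =====
def Claim_equal_fill_empty_spaces : Prop := ∀ (rows : Int) (cols : Int) (items : List (Option Int)) (horizontal_orientation : String) (vertical_orientation : String), Dom_fill_empty_spaces rows cols items horizontal_orientation vertical_orientation → Pre_fill_empty_spaces rows cols items horizontal_orientation vertical_orientation → Spec_fill_empty_spaces rows cols items horizontal_orientation vertical_orientation (fill_empty_spaces rows cols items horizontal_orientation vertical_orientation)

-- ===== LEMMAS AND PROOFS =====

-- length of a flatMap whose blocks all have length C
theorem pv_length_flatMap_const {α β : Type} (l : List β) (g : β → List α) (C : Nat)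
    (hg : ∀ b ∈ l, (g b).length = C) : (l.flatMap g).length = l.length * C := by
  induction l with
  | nil => simp
  | cons b l ih =>
    simp only [List.flatMap_cons, List.length_append, List.length_cons]
    rw [hg b (by simp), ih (fun x hx => hg x (by simp [hx]))]
    ring

-- indexing a flatMap whose blocks all have length C
theorem pv_getElem?_flatMap_const {α β : Type} (l : List β) (g : β → List α) (C : Nat)
    (hg : ∀ b ∈ l, (g b).length = C) (r c : Nat) (hr : r < l.length) (hc : c < C) :
    (l.flatMap g)[r * C + c]? = (g (l[r]'hr))[c]? := by
  induction l generalizing r with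
  | nil => simp at hr
  | cons b l ih =>
    simp only [List.flatMap_cons]
    cases r with
    | zero =>
      simp only [Nat.zero_mul, Nat.zero_add]
      rw [List.getElem?_append_left]
      · simp
      · rw [hg b (by simp)]; exact hc
    | succ r =>
      rw [List.getElem?_append_right (by rw [hg b (by simp)]; nlinarith)]
      rw [hg b (by simp)]
      have : (r + 1) * C + c - C = r * C + c := by ring_nf; omega
      rw [this, ih (fun x hx => hg x (by simp [hx])) r (by simpa using hr)]
      simp

-- a foldl of set's leaves untouched positions alone
theorem pv_foldl_set_not_mem {α : Type} (l : List (α × Nat)) (g : List α) (p : Nat)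
    (h : ∀ x ∈ l, x.2 ≠ p) :
    (l.foldl (fun g x => g.set x.2 x.1) g)[p]? = g[p]? := by
  induction l generalizing g with
  | nil => rfl
  | cons x l ih =>
    simp only [List.foldl_cons]
    rw [ih _ (fun y hy => h y (by simp [hy]))]
    exact List.getElem?_set_ne (h x (by simp))

-- a foldl of set's with pairwise-distinct target positions stores each value at its position
theorem pv_foldl_set_mem {α : Type} (l : List (α × Nat)) (g : List α) (a : α) (p : Nat)
    (hmem : (a, p) ∈ l) (hnd : (l.map Prod.snd).Nodup) (hp : p < g.length) :
    (l.foldl (fun g x => g.set x.2 x.1) g)[p]? = some a := by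
  induction l generalizing g with
  | nil => simp at hmem
  | cons x l ih =>
    simp only [List.map_cons, List.nodup_cons] at hnd
    simp only [List.foldl_cons]
    rcases List.mem_cons.mp hmem with h | h
    · subst h
      rw [pv_foldl_set_not_mem]
      · exact List.getElem?_set_self hp
      · intro y hy hyp
        exact hnd.1 (List.mem_map.mpr ⟨y, hy, hyp⟩)
    · exact ih _ h hnd.2 (by simpa using hp)

-- a foldl of set's preserves the length
theorem pv_length_foldl_set {α : Type} (l : List (α × Nat)) (g : List α) :
    (l.foldl (fun g x => g.set x.2 x.1) g).length = g.length := by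
  induction l generalizing g with
  | nil => rfl
  | cons x l ih => simp [List.foldl_cons, ih]

-- uniqueness of the (row, col) decomposition of a cell index, Int version
theorem pv_cell_inj (Ci r c r' c' : Int) (hc0 : 0 ≤ c) (hc1 : c < Ci) (hc0' : 0 ≤ c') (hc1' : c' < Ci)
    (h : r * Ci + c = r' * Ci + c') : r = r' ∧ c = c' := by
  rcases lt_trichotomy r r' with h1 | h1 | h1
  · have h2 : (r + 1) * Ci ≤ r' * Ci := mul_le_mul_of_nonneg_right (by omega) (by omega)
    nlinarith
  · subst h1
    exact ⟨rfl, by linarith⟩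
  · have h2 : (r' + 1) * Ci ≤ r * Ci := mul_le_mul_of_nonneg_right (by omega) (by omega)
    nlinarith

-- a cell index is below the number of cells
theorem pv_cell_lt (R C a b : Nat) (ha : a < R) (hb : b < C) : a * C + b < R * C :=
  calc a * C + b < (a + 1) * C := by ring_nf; omega
  _ ≤ R * C := Nat.mul_le_mul_right C ha

-- ===== VERDICT (by name: the statement is the Claim_ definition above) =====
theorem fill_empty_spaces_spec : Claim_equal_fill_empty_spaces := by
  intro rows cols items ho vo hDom hPre
  show fill_empty_spaces _ _ _ _ _ = fill_empty_spaces_alt _ _ _ _ _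
  have hc0 : 0 ≤ cols := hPre
  by_cases hr0 : 0 ≤ rows
  case neg =>
    have hrow0 : PySem.List.pyRange 0 rows 1 = [] := PySem.List.pyRange_one_eq_nil (by omega)
    have htc : (rows * cols).toNat = 0 := by
      have := mul_nonpos_of_nonpos_of_nonneg (by omega : rows ≤ 0) hc0
      omega
    simp [fill_empty_spaces, fill_empty_spaces_alt, hrow0, PySem.List.pyRepeat_singleton, htc]
  obtain ⟨R, rfl⟩ : ∃ R : Nat, rows = (R : Int) := ⟨rows.toNat, (Int.toNat_of_nonneg hr0).symm⟩
  obtain ⟨C, rfl⟩ : ∃ C : Nat, cols = (C : Int) := ⟨cols.toNat, (Int.toNat_of_nonneg hc0).symm⟩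
  set tb : Bool := ("top_to_bottom" == vo) with htb
  set lr : Bool := ("left_to_right" == ho) with hlr
  set P : List (Option Int) := items.take (R * C) ++ List.replicate (R * C - items.length) none with hP
  have hPlen : P.length = R * C := by simp [hP]; omega
  have hcast : ((R : Int) * (C : Int)) = ((R * C : Nat) : Int) := by push_cast; ring
  have hpad : PySem.List.slice items none (some ((R : Int) * (C : Int))) ++
      PySem.List.pyRepeat [(none : Option Int)] ((R : Int) * (C : Int) - (items.length : Int)) = P := by
    rw [hcast, PySem.List.slice_to_natCast, PySem.List.pyRepeat_singleton, hP]
    congr 2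
    omega
  set rI : Nat → Nat := fun i => if tb then i else R - 1 - i with hrI
  set cI : Nat → Nat := fun j => if lr then j else C - 1 - j with hcI
  have hrIlt : ∀ i, i < R → rI i < R := by intro i hi; simp only [hrI]; split <;> omega
  have hcIlt : ∀ j, j < C → cI j < C := by intro j hj; simp only [hcI]; split <;> omega
  have hrIinv : ∀ i, i < R → rI (rI i) = i := by
    intro i hi; by_cases h : tb <;> simp only [hrI, h, if_true, if_false, Bool.false_eq_true] <;> omega
  have hcIinv : ∀ j, j < C → cI (cI j) = j := by
    intro j hj; by_cases h : lr <;> simp only [hcI, h, if_true, if_false, Bool.false_eq_true] <;> omega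
  set row_order : List Int := if tb then PySem.List.pyRange 0 (R : Int) 1 else (PySem.List.pyRange 0 (R : Int) 1).reverse with hrow
  set col_order : List Int := if lr then PySem.List.pyRange 0 (C : Int) 1 else (PySem.List.pyRange 0 (C : Int) 1).reverse with hcol
  have hrowlen : row_order.length = R := by
    by_cases h : tb <;> simp [hrow, h, PySem.List.length_pyRange_one]
  have hcollen : col_order.length = C := by
    by_cases h : lr <;> simp [hcol, h, PySem.List.length_pyRange_one]
  have hrowget : ∀ i, i < R → row_order[i]? = some ((rI i : Nat) : Int) := by
    intro i hi
    by_cases h : tb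
    · simp [hrow, hrI, h, hi]
    · have hlen : i < (PySem.List.pyRange 0 (R : Int) 1).length := by
        simp [PySem.List.length_pyRange_one]; omega
      rw [hrow, if_neg (by simp [h]), List.getElem?_reverse hlen]
      simp [PySem.List.length_pyRange_one, PySem.List.getElem?_pyRange_one, hrI, h]
      omega
  have hcolget : ∀ j, j < C → col_order[j]? = some ((cI j : Nat) : Int) := by
    intro j hj
    by_cases h : lr
    · simp [hcol, hcI, h, hj]
    · have hlen : j < (PySem.List.pyRange 0 (C : Int) 1).length := by
        simp [PySem.List.length_pyRange_one]; omega
      rw [hcol, if_neg (by simp [h]), List.getElem?_reverse hlen]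
      simp [PySem.List.length_pyRange_one, PySem.List.getElem?_pyRange_one, hcI, h]
      omega
  have hrowmem : ∀ r ∈ row_order, 0 ≤ r ∧ r < (R : Int) := by
    intro r hr
    have h2 : r ∈ PySem.List.pyRange 0 (R : Int) 1 := by
      by_cases h : tb
      · simpa [hrow, h] using hr
      · simpa [hrow, h] using hr
    simpa using PySem.List.mem_pyRange_one.mp h2
  have hcolmem : ∀ c ∈ col_order, 0 ≤ c ∧ c < (C : Int) := by
    intro c hc
    have h2 : c ∈ PySem.List.pyRange 0 (C : Int) 1 := by
      by_cases h : lr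
      · simpa [hcol, h] using hc
      · simpa [hcol, h] using hc
    simpa using PySem.List.mem_pyRange_one.mp h2
  have hrownd : row_order.Nodup := by
    by_cases h : tb <;> simp [hrow, h, PySem.List.nodup_pyRange_one]
  have hcolnd : col_order.Nodup := by
    by_cases h : lr <;> simp [hcol, h, PySem.List.nodup_pyRange_one]
  set pos : List (Int × Int) := row_order.flatMap (fun r => col_order.map (fun c => (r, c))) with hpos
  have hblock : ∀ b ∈ row_order, ((fun r => col_order.map (fun c => (r, c))) b).length = C := by
    intro b _; simpa using hcollen
  have hposlen : pos.length = R * C := by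
    rw [hpos, pv_length_flatMap_const _ _ C hblock, hrowlen]
  have hposnd : pos.Nodup := by
    have h2 : pos = row_order ×ˢ col_order := rfl
    rw [h2]; exact hrownd.product hcolnd
  have hposget : ∀ a b, a < R → b < C →
      pos[a * C + b]? = some (((rI a : Nat) : Int), ((cI b : Nat) : Int)) := by
    intro a b ha hb
    have ha' : a < row_order.length := by rw [hrowlen]; exact ha
    rw [hpos, pv_getElem?_flatMap_const _ _ C hblock a b ha' hb]
    have hval : row_order[a]'ha' = ((rI a : Nat) : Int) := by
      have h2 := hrowget a ha
      rw [List.getElem?_eq_getElem ha'] at h2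
      exact Option.some.inj h2
    rw [hval, List.getElem?_map, hcolget b hb]
    rfl
  have hposmem : ∀ x ∈ pos, (0 ≤ x.1 ∧ x.1 < (R : Int)) ∧ (0 ≤ x.2 ∧ x.2 < (C : Int)) := by
    intro x hx
    rw [hpos] at hx
    simp only [List.mem_flatMap, List.mem_map] at hx
    obtain ⟨r, hr, c, hc, hrc⟩ := hx
    rw [← hrc]
    exact ⟨hrowmem r hr, hcolmem c hc⟩
  -- A in set-fold normal form
  set M : List (Option Int × Nat) :=
    (P.zip pos).map (fun x => (x.1, (x.2.1 * (C : Int) + x.2.2).toNat)) with hM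
  have hcong : ∀ (acc : List (Option Int)), ∀ x ∈ P.zip pos,
      PySem.List.pySetD acc (x.2.1 * (C : Int) + x.2.2) x.1
        = acc.set (x.2.1 * (C : Int) + x.2.2).toNat x.1 := by
    intro acc x hx
    have hx2 := hposmem x.2 (List.of_mem_zip hx).2
    have hm : 0 ≤ x.2.1 * (C : Int) := mul_nonneg hx2.1.1 (by positivity)
    exact PySem.List.pySetD_of_nonneg _ _ (by omega)
  have hA : fill_empty_spaces (R : Int) (C : Int) items ho vo
      = M.foldl (fun g y => g.set y.2 y.1) (List.replicate (R * C) (none : Option Int)) := by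
    simp only [fill_empty_spaces]
    rw [hpad, ← htb, ← hlr, ← hrow, ← hcol, ← hpos, hcast, PySem.List.pyRepeat_singleton,
      Int.toNat_natCast,
      PySem.List.foldl_congr_mem _ _ (fun g x => g.set (x.2.1 * (C : Int) + x.2.2).toNat x.1) _ hcong,
      hM, List.foldl_map]
  have hAlen : (fill_empty_spaces (R : Int) (C : Int) items ho vo).length = R * C := by
    rw [hA, pv_length_foldl_set, List.length_replicate]
  -- B in chunk form
  set Ch : Nat → List (Option Int) := fun i => (P.drop (i * C)).take C with hCh
  have hChlen : ∀ i, i < R → (Ch i).length = C := by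
    intro i hi
    have : i * C + C ≤ R * C := by nlinarith
    simp only [hCh, List.length_take, List.length_drop, hPlen]
    omega
  have hChget : ∀ i b, i < R → b < C → (Ch i)[b]? = P[i * C + b]? := by
    intro i b hi hb
    simp only [hCh]
    rw [List.getElem?_take_of_lt hb, List.getElem?_drop]
  set chunks0 : List (List (Option Int)) :=
    (PySem.List.pyRange 0 (R : Int) 1).map
      (fun i => PySem.List.slice P (some (i * (C : Int))) (some ((i + 1) * (C : Int)))) with hc0def
  have hc0len : chunks0.length = R := by
    simp [hc0def, PySem.List.length_pyRange_one]
  have hc0get : ∀ i, i < R → chunks0[i]? = some (Ch i) := by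
    intro i hi
    have hi' : i < (PySem.List.pyRange 0 (R : Int) 1).length := by
      simp [PySem.List.length_pyRange_one]; omega
    rw [hc0def, List.getElem?_map]
    have hv : (PySem.List.pyRange 0 (R : Int) 1)[i]? = some ((i : Nat) : Int) := by
      simp [PySem.List.getElem?_pyRange_one]; omega
    rw [hv, Option.map_some]
    congr 1
    have h1 : (i : Int) * (C : Int) = ((i * C : Nat) : Int) := by push_cast; ring
    have h2 : ((i : Int) + 1) * (C : Int) = ((i * C : Nat) : Int) + ((C : Nat) : Int) := by
      push_cast; ring
    rw [h1, h2, PySem.List.slice_natCast_add, hCh]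
  set chunks1 : List (List (Option Int)) :=
    if vo != "top_to_bottom" then chunks0.reverse else chunks0 with hc1def
  have hc1len : chunks1.length = R := by
    by_cases h : (vo != "top_to_bottom") <;> simp [hc1def, h, hc0len]
  have hbne : (vo != "top_to_bottom") = !tb := by
    rw [htb]
    by_cases h : vo = "top_to_bottom"
    · subst h; simp
    · rw [bne, beq_eq_false_iff_ne.mpr h, beq_eq_false_iff_ne.mpr (Ne.symm h)]
  have hc1get : ∀ i, i < R → chunks1[i]? = some (Ch (rI i)) := by
    intro i hi
    by_cases h : tb
    · rw [hc1def, hbne, h]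
      simpa [hrI, h] using hc0get i hi
    · have hi' : i < chunks0.length := by rw [hc0len]; exact hi
      have hF : tb = false := by simpa using h
      rw [hc1def, hbne, hF]
      simp only [Bool.not_false, if_pos]
      rw [List.getElem?_reverse hi', hc0len]
      have := hc0get (R - 1 - i) (by omega)
      simpa [hrI, h] using this
  set chunks2 : List (List (Option Int)) :=
    if ho != "left_to_right" then chunks1.map (fun row => row.reverse) else chunks1 with hc2def
  have hbne2 : (ho != "left_to_right") = !lr := by
    rw [hlr]
    by_cases h : ho = "left_to_right"
    · subst h; simp
    · rw [bne, beq_eq_false_iff_ne.mpr h, beq_eq_false_iff_ne.mpr (Ne.symm h)]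
  have hc2len : chunks2.length = R := by
    by_cases h : (ho != "left_to_right") <;> simp [hc2def, h, hc1len]
  have hc2get : ∀ i, i < R →
      chunks2[i]? = some (if lr then Ch (rI i) else (Ch (rI i)).reverse) := by
    intro i hi
    by_cases h : lr
    · rw [hc2def, hbne2, h]
      simpa [h] using hc1get i hi
    · have hF : lr = false := by simpa using h
      rw [hc2def, hbne2, hF]
      simp only [Bool.not_false, if_pos, List.getElem?_map, hc1get i hi]
      simp
  have hc2blk : ∀ row ∈ chunks2, row.length = C := by
    intro row hrow2
    obtain ⟨i, hi⟩ := List.mem_iff_getElem?.mp hrow2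
    have hiR : i < R := by
      have : i < chunks2.length := List.getElem?_eq_some_iff.mp hi |>.1
      omega
    have h2 := hc2get i hiR
    rw [hi] at h2
    have h3 := Option.some.inj h2
    rw [h3]
    by_cases h : lr
    · rw [if_pos h]; exact hChlen _ (hrIlt i hiR)
    · rw [if_neg (by simp [h]), List.length_reverse]; exact hChlen _ (hrIlt i hiR)
  have hBdef : fill_empty_spaces_alt (R : Int) (C : Int) items ho vo
      = chunks2.flatMap (fun row => row) := by
    simp only [fill_empty_spaces_alt]
    rw [hpad, ← hc0def, ← hc1def, ← hc2def]
  have hBlen : (fill_empty_spaces_alt (R : Int) (C : Int) items ho vo).length = R * C := by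
    rw [hBdef, pv_length_flatMap_const _ _ C hc2blk, hc2len]
  have hBget : ∀ a b, a < R → b < C →
      (fill_empty_spaces_alt (R : Int) (C : Int) items ho vo)[a * C + b]?
        = some (P.getD (rI a * C + cI b) none) := by
    intro a b ha hb
    have ha' : a < chunks2.length := by rw [hc2len]; exact ha
    rw [hBdef, pv_getElem?_flatMap_const _ _ C hc2blk a b ha' hb]
    have hval : chunks2[a]'ha' = (if lr then Ch (rI a) else (Ch (rI a)).reverse) := by
      have h2 := hc2get a ha
      rw [List.getElem?_eq_getElem ha'] at h2
      exact Option.some.inj h2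
    rw [hval]
    have hk : rI a * C + cI b < P.length := by
      rw [hPlen]; exact pv_cell_lt R C _ _ (hrIlt a ha) (hcIlt b hb)
    have hPk : P[rI a * C + cI b]? = some (P.getD (rI a * C + cI b) none) := by
      rw [List.getElem?_eq_getElem hk, List.getD_eq_getElem P none hk]
    by_cases h : lr
    · rw [if_pos h, hChget (rI a) b (hrIlt a ha) hb]
      have : cI b = b := by simp [hcI, h]
      rw [← hPk, this]
    · rw [if_neg (by simp [h])]
      have hbl : b < (Ch (rI a)).length := by rw [hChlen (rI a) (hrIlt a ha)]; exact hb
      rw [List.getElem?_reverse hbl, hChlen (rI a) (hrIlt a ha),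
        hChget (rI a) (C - 1 - b) (hrIlt a ha) (by omega)]
      have : cI b = C - 1 - b := by simp [hcI, h]
      rw [← hPk, this]
  -- A pointwise
  have hAget : ∀ a b, a < R → b < C →
      (M.foldl (fun g y => g.set y.2 y.1) (List.replicate (R * C) (none : Option Int)))[a * C + b]?
        = some (P.getD (rI a * C + cI b) none) := by
    intro a b ha hb
    have hkR : rI a * C + cI b < R * C := pv_cell_lt R C _ _ (hrIlt a ha) (hcIlt b hb)
    have hkP : rI a * C + cI b < P.length := by omega
    have hkpos : rI a * C + cI b < pos.length := by omega
    have hMget : M[rI a * C + cI b]? = some (P.getD (rI a * C + cI b) none, a * C + b) := by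
      have hkz : rI a * C + cI b < (P.zip pos).length := by
        simp [List.length_zip, hPlen, hposlen]; omega
      rw [hM, List.getElem?_map, List.getElem?_eq_getElem hkz, List.getElem_zip]
      have hposk : pos[rI a * C + cI b]'hkpos = ((a : Int), (b : Int)) := by
        have h2 := hposget (rI a) (cI b) (hrIlt a ha) (hcIlt b hb)
        rw [List.getElem?_eq_getElem hkpos] at h2
        rw [Option.some.inj h2, hrIinv a ha, hcIinv b hb]
      rw [Option.map_some, hposk]
      have hnat : (((a : Int)) * (C : Int) + ((b : Int))).toNat = a * C + b := by
        rw [show ((a : Int)) * (C : Int) + ((b : Int)) = ((a * C + b : Nat) : Int) by push_cast; ring]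
        exact Int.toNat_natCast _
      have hgd : P[rI a * C + cI b]'hkP = P.getD (rI a * C + cI b) none :=
        (List.getD_eq_getElem P none hkP).symm
      simp [hnat, hgd]
    have hmem : (P.getD (rI a * C + cI b) none, a * C + b) ∈ M := List.mem_of_getElem? hMget
    have hsnd : M.map Prod.snd = pos.map (fun y => (y.1 * (C : Int) + y.2).toNat) := by
      rw [hM, List.map_map]
      have hcomp : (Prod.snd ∘ fun x : Option Int × (Int × Int) =>
          (x.1, (x.2.1 * (C : Int) + x.2.2).toNat))
          = (fun y : Int × Int => (y.1 * (C : Int) + y.2).toNat) ∘ Prod.snd := rfl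
      rw [hcomp, ← List.map_map, List.map_snd_zip (by omega)]
    have hndM : (M.map Prod.snd).Nodup := by
      rw [hsnd]
      refine hposnd.map_on ?_
      intro x hx y hy heq
      have hxb := hposmem x hx
      have hyb := hposmem y hy
      have hxnn : 0 ≤ x.1 * (C : Int) + x.2 := by
        have := mul_nonneg hxb.1.1 (by positivity : (0 : Int) ≤ (C : Int)); omega
      have hynn : 0 ≤ y.1 * (C : Int) + y.2 := by
        have := mul_nonneg hyb.1.1 (by positivity : (0 : Int) ≤ (C : Int)); omega
      have heq2 : x.1 * (C : Int) + x.2 = y.1 * (C : Int) + y.2 := by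
        rw [← Int.toNat_of_nonneg hxnn, ← Int.toNat_of_nonneg hynn, heq]
      have h3 := pv_cell_inj (C : Int) x.1 x.2 y.1 y.2 hxb.2.1 hxb.2.2 hyb.2.1 hyb.2.2 heq2
      exact Prod.ext h3.1 h3.2
    exact pv_foldl_set_mem M _ _ _ hmem hndM
      (by rw [List.length_replicate]; exact pv_cell_lt R C a b ha hb)
  -- pointwise equality
  apply List.ext_getElem?
  intro p
  by_cases hp : p < R * C
  · have hC : 0 < C := by
      rcases Nat.eq_zero_or_pos C with h | h
      · subst h; omega
      · exact h
    have hb : p % C < C := Nat.mod_lt _ hC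
    have ha : p / C < R := by
      rw [Nat.div_lt_iff_lt_mul hC]
      exact hp
    have hpab : p / C * C + p % C = p := by
      rw [Nat.mul_comm]
      exact Nat.div_add_mod p C
    rw [hA, ← hpab, hAget _ _ ha hb, hBget _ _ ha hb]
  · rw [List.getElem?_eq_none (by rw [hAlen]; omega), List.getElem?_eq_none (by rw [hBlen]; omega)]
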